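-- pv_equiv track=rewrite | github.com/xinnyu/Mechanical-Design-Manual-Software-Edition | scripts/extract_data.py | _find_data_start
-- ===== SOURCE A (Python) =====
-- def _find_data_start(cells, cols):
--     """找到数据行的起始位置（跳过不对齐的表头）。
--
--     扫描所有可能的起始位置，选择使前两行数值比例最高的位置。
--     """
--     n = len(cells)
--
--     def _is_num(s):
--         s = s.strip()
--         if not s or s in ('-', '—'):
--             return True
--         try:
--             float(s)
--             return True
--         except ValueError:
--             return False
--
--     best_d = 0
--     best_score = -1
--     search_range = min(n - cols * 2, cols * 3)
--     if search_range <= 0: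
--         return 0
--
--     for d in range(search_range):
--         if d + cols * 2 > n:
--             break
--         row1 = cells[d:d + cols]
--         row2 = cells[d + cols:d + cols * 2]
--         num1 = sum(1 for c in row1 if _is_num(c))
--         num2 = sum(1 for c in row2 if _is_num(c))
--         score = num1 + num2
--         if score > best_score:
--             best_score = score
--             best_d = d
--
--     # 只有当数值行确实比全部从头开始好时才偏移
--     if best_score >= cols * 1.6:
--         return best_d
--     return 0
-- ===== SOURCE B (Python) =====
-- def _find_data_start(cells, cols):
--     """Pick the offset whose two following rows have the most numeric cells,
--     scored via one pass of numeric flags and prefix sums (one test per cell)."""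
--     n = len(cells)
--
--     def _is_num(s):
--         s = s.strip()
--         if not s or s in ('-', '—'):
--             return True
--         try:
--             float(s)
--             return True
--         except ValueError:
--             return False
--
--     search_range = min(n - cols * 2, cols * 3)
--     if search_range <= 0:
--         return 0
--     w = 2 * cols
--     s = 0
--     prefix = [0]
--     for c in cells[:search_range + w]:
--         s += 1 if _is_num(c) else 0
--         prefix.append(s)
--     best_d, best_score = 0, -1
--     for d in range(search_range):
--         score = prefix[d + w] - prefix[d]
--         if score > best_score:
--             best_d, best_score = d, score
--     if best_score >= cols * 1.6:
--         return best_d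
--     return 0
-- ===== Notes on version B (the rewrite author's own statement) =====
-- stated objective: alternative
-- what changed: B tests each scanned cell for numericity once and builds a prefix-sum array, scoring every candidate offset from two prefix sums instead of re-slicing and re-testing two rows of cols cells per offset.
import Mathlib
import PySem

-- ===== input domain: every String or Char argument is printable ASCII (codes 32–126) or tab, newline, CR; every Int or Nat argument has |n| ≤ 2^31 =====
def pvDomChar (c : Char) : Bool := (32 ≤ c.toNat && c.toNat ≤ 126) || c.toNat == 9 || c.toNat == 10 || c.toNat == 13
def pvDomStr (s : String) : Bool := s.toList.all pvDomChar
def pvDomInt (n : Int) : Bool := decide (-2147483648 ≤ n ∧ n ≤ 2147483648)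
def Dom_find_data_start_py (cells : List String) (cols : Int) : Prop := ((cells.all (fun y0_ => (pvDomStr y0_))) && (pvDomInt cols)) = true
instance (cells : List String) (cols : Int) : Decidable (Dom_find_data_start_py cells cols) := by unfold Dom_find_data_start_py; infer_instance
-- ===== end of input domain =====

-- B replaces A's rescan of every candidate window (two fresh slices, each cell re-tested per
-- offset) by one pass of numeric flags plus prefix sums, scoring each offset from two sums.

-- ===== PORT A =====
-- helper shared by both ports: both Pythons contain the identical nested `_is_num`.
-- `float(s)`'s accept/reject behaviour is ported by hand as a grammar on the characters
-- (sign, digit groups with single underscores between digits, optional '.', optional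
-- exponent, inf/infinity/nan case-insensitively); exact for stripped ASCII strings.

-- one digit-group tail: digits, with single '_' allowed only between digits
def pvDigitsRest : List Char → List Char
  | '_' :: c :: rest => if c.isDigit then pvDigitsRest rest else '_' :: c :: rest
  | c :: rest => if c.isDigit then pvDigitsRest rest else c :: rest
  | [] => []

-- a digitpart: at least one digit; returns the remaining characters, none if no leading digit
def pvDigitpart : List Char → Option (List Char)
  | c :: rest => if c.isDigit then some (pvDigitsRest rest) else none
  | [] => none

-- optional exponent then end of string
def pvExpPart : List Char → Bool
  | [] => true
  | c :: r =>
    if c = 'e' ∨ c = 'E' then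
      let r' := match r with
        | '+' :: t => t
        | '-' :: t => t
        | t => t
      match pvDigitpart r' with
      | some [] => true
      | _ => false
    else false

-- mantissa (digits [. digits] | . digits) followed by pvExpPart
def pvMantissa (l : List Char) : Bool :=
  match pvDigitpart l with
  | some r1 =>
    match r1 with
    | '.' :: r2 =>
      (match pvDigitpart r2 with
       | some r3 => pvExpPart r3
       | none => pvExpPart r2)
    | _ => pvExpPart r1
  | none =>
    match l with
    | '.' :: r =>
      (match pvDigitpart r with
       | some r3 => pvExpPart r3
       | none => false)
    | _ => false

-- would `float(String.mk l)` succeed? (l already stripped)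
def pvFloatAccepts (l : List Char) : Bool :=
  let l' := match l with
    | '+' :: t => t
    | '-' :: t => t
    | t => t
  let low := l'.map PySem.Chars.lowerChar
  if low = "inf".toList ∨ low = "infinity".toList ∨ low = "nan".toList then true
  else pvMantissa l'

-- Python `_is_num`
def isNumPy (s : String) : Bool :=
  let t := PySem.Str.strip s
  if t = "" || t = "-" || t = "—" then true
  else pvFloatAccepts t.toList

-- the body of A's `for d in range(search_range)` loop; the Bool is the `break` flag
def pvStepA (cells : List String) (cols n : Int) (st : Bool × Int × Int) (d : Int) : Bool × Int × Int :=
  match st with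
  | (true, bd, bs) => (true, bd, bs)
  | (false, bd, bs) =>
    if d + cols * 2 > n then (true, bd, bs)
    else
      let row1 := PySem.List.slice cells (some d) (some (d + cols))
      let row2 := PySem.List.slice cells (some (d + cols)) (some (d + cols * 2))
      let num1 : Int := (row1.countP isNumPy : Nat)
      let num2 : Int := (row2.countP isNumPy : Nat)
      let score := num1 + num2
      if score > bs then (false, d, score) else (false, bd, bs)

def find_data_start_py (cells : List String) (cols : Int) : Int :=
  let n : Int := cells.length
  let search_range := min (n - cols * 2) (cols * 3)
  if search_range ≤ 0 then 0
  else
    let st := (PySem.List.pyRange 0 search_range 1).foldl (pvStepA cells cols n) (false, 0, -1)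
    -- `best_score >= cols * 1.6` ported as 5*best_score ≥ 8*cols: exact, since for |cols| ≤ 2^31
    -- the double `cols * 1.6` differs from the rational 8*cols/5 by less than 0.2
    if 5 * st.2.2 ≥ 8 * cols then st.2.1 else 0

-- ===== PORT B =====
-- body of B's scoring loop: window score from the prefix sums (indices always in range,
-- d + w ≤ len(prefix) - 1, so the pyGetD default is never used)
def pvStepB (pre : List Int) (w : Int) (st : Int × Int) (d : Int) : Int × Int :=
  let score := PySem.List.pyGetD pre (d + w) 0 - PySem.List.pyGetD pre d 0
  if score > st.2 then (d, score) else st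

def find_data_start_py_alt (cells : List String) (cols : Int) : Int :=
  let n : Int := cells.length
  let search_range := min (n - cols * 2) (cols * 3)
  if search_range ≤ 0 then 0
  else
    let w := 2 * cols
    let pre := ((PySem.List.slice cells none (some (search_range + w))).foldl
      (fun (p : Int × List Int) c =>
        let s := p.1 + (if isNumPy c then (1 : Int) else 0)
        (s, p.2 ++ [s])) (0, [(0 : Int)])).2
    let st := (PySem.List.pyRange 0 search_range 1).foldl (pvStepB pre w) (0, -1)
    -- `best_score >= cols * 1.6` ported as 5*best_score ≥ 8*cols (same exactness note as in port A)
    if 5 * st.2 ≥ 8 * cols then st.1 else 0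

-- ===== PRECONDITION & SPEC =====
def Spec_find_data_start_py (cells : List String) (cols : Int) (out : Int) : Prop := out = find_data_start_py_alt cells cols
instance (cells : List String) (cols : Int) (out : Int) : Decidable (Spec_find_data_start_py cells cols out) := by unfold Spec_find_data_start_py; infer_instance

-- ===== CLAIM (what is proved, stated in full; the proofs are below) =====
def Claim_equal_find_data_start_py : Prop := ∀ (cells : List String) (cols : Int), Dom_find_data_start_py cells cols → Spec_find_data_start_py cells cols (find_data_start_py cells cols)

-- ===== LEMMAS AND PROOFS =====

-- prefix of numeric counts
def pvS (cells : List String) (k : Nat) : Int := ((cells.take k).countP isNumPy : Nat)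

lemma pv_prefix_struct (cells : List String) (s0 : Int) (pre0 : List Int) :
    (cells.foldl
      (fun (p : Int × List Int) c =>
        let s := p.1 + (if isNumPy c then (1 : Int) else 0)
        (s, p.2 ++ [s])) (s0, pre0)).2
    = pre0 ++ (List.range cells.length).map
        (fun i => s0 + (((cells.take (i+1)).countP isNumPy : Nat) : Int)) := by
  induction cells generalizing s0 pre0 with
  | nil => simp
  | cons c rest ih =>
    simp only [List.foldl_cons]
    rw [ih]
    simp only [List.length_cons, List.range_succ_eq_map, List.map_cons, List.map_map,
      List.take_succ_cons, List.countP_cons, List.append_assoc, List.cons_append,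
      List.nil_append, Function.comp_def]
    by_cases h : isNumPy c <;> simp [h]
    all_goals intros; ring

lemma pv_pre_getD (cells : List String) (m i : Nat) (hi : i ≤ m) (hlen : i ≤ cells.length) :
    PySem.List.pyGetD
      (((cells.take m).foldl
        (fun (p : Int × List Int) c =>
          (p.1 + (if isNumPy c then (1 : Int) else 0),
           p.2 ++ [p.1 + (if isNumPy c then (1 : Int) else 0)])) (0, [(0 : Int)])).2)
      (i : Int) 0 = pvS cells i := by
  rw [show (fun (p : Int × List Int) c =>
        (p.1 + (if isNumPy c then (1 : Int) else 0),
         p.2 ++ [p.1 + (if isNumPy c then (1 : Int) else 0)]))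
      = (fun (p : Int × List Int) c =>
        let s := p.1 + (if isNumPy c then (1 : Int) else 0)
        (s, p.2 ++ [s])) from rfl, pv_prefix_struct, PySem.List.pyGetD_natCast]
  cases i with
  | zero => simp [pvS]
  | succ j =>
    have hj : j < min m cells.length := by omega
    simp [List.getD, hj, pvS, List.take_take, Nat.min_eq_left hi]

lemma pv_countP_take_add (cells : List String) (a b : Nat) :
    (cells.take (a+b)).countP isNumPy
      = (cells.take a).countP isNumPy + ((cells.drop a).take b).countP isNumPy := by
  rw [List.take_add, List.countP_append]

lemma pv_nobreak (cells : List String) (cols n : Int) (l : List Int)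
    (h : ∀ d ∈ l, ¬ d + cols * 2 > n) (p : Int × Int) :
    l.foldl (pvStepA cells cols n) (false, p)
    = (false, l.foldl (fun (q : Int × Int) d =>
        let score : Int := (((PySem.List.slice cells (some d) (some (d + cols))).countP isNumPy : Nat) : Int)
          + (((PySem.List.slice cells (some (d + cols)) (some (d + cols * 2))).countP isNumPy : Nat) : Int)
        if score > q.2 then (d, score) else q) p) := by
  induction l generalizing p with
  | nil => rfl
  | cons d rest ih =>
    have hd := h d (by simp)
    obtain ⟨bd, bs⟩ := p
    simp only [List.foldl_cons, pvStepA, if_neg hd]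
    split
    · exact ih (fun e he => h e (by simp [he])) _
    · exact ih (fun e he => h e (by simp [he])) _

lemma pv_score_eq (cells : List String) (cols d : Int) (m : Nat) (hc : 0 ≤ cols) (hd : 0 ≤ d)
    (hbound : d + cols * 2 ≤ (cells.length : Int)) (hm : d + 2 * cols ≤ (m : Int)) :
    (((PySem.List.slice cells (some d) (some (d + cols))).countP isNumPy : Nat) : Int)
      + (((PySem.List.slice cells (some (d + cols)) (some (d + cols * 2))).countP isNumPy : Nat) : Int)
    = PySem.List.pyGetD
        (((cells.take m).foldl
          (fun (p : Int × List Int) c =>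
            (p.1 + (if isNumPy c then (1 : Int) else 0),
             p.2 ++ [p.1 + (if isNumPy c then (1 : Int) else 0)])) (0, [(0 : Int)])).2) (d + 2 * cols) 0
      - PySem.List.pyGetD
        (((cells.take m).foldl
          (fun (p : Int × List Int) c =>
            (p.1 + (if isNumPy c then (1 : Int) else 0),
             p.2 ++ [p.1 + (if isNumPy c then (1 : Int) else 0)])) (0, [(0 : Int)])).2) d 0 := by
  obtain ⟨a, rfl⟩ : ∃ a : Nat, (a : Int) = d := ⟨d.toNat, Int.toNat_of_nonneg hd⟩
  obtain ⟨c, rfl⟩ : ∃ c : Nat, (c : Int) = cols := ⟨cols.toNat, Int.toNat_of_nonneg hc⟩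
  have h1 : (a : Int) + (c : Int) = ((a + c : Nat) : Int) := by push_cast; ring
  have h2 : (a : Int) + (c : Int) * 2 = ((a + c + c : Nat) : Int) := by push_cast; ring
  have h3 : (a : Int) + 2 * (c : Int) = ((a + c + c : Nat) : Int) := by push_cast; ring
  have hlen : a + c + c ≤ cells.length := by omega
  rw [h1, h2, h3, PySem.List.slice_natCast, PySem.List.slice_natCast,
    pv_pre_getD cells m (a + c + c) (by omega) hlen, pv_pre_getD cells m a (by omega) (by omega)]
  have e1 : a + c - a = c := by omega
  have e2 : a + c + c - (a + c) = c := by omega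
  rw [e1, e2]
  have t1 := pv_countP_take_add cells a c
  have t2 := pv_countP_take_add cells (a + c) c
  simp only [pvS]
  omega

theorem find_data_start_py_spec : Claim_equal_find_data_start_py := by
  intro cells cols _hdom
  unfold Spec_find_data_start_py
  simp only [find_data_start_py, find_data_start_py_alt]
  by_cases hsr : min ((cells.length : Int) - cols * 2) (cols * 3) ≤ 0
  · rw [if_pos hsr, if_pos hsr]
  · rw [if_neg hsr, if_neg hsr]
    have h0 : 0 < min ((cells.length : Int) - cols * 2) (cols * 3) := not_le.mp hsr
    have hmin1 := min_le_left ((cells.length : Int) - cols * 2) (cols * 3)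
    have hmin2 := min_le_right ((cells.length : Int) - cols * 2) (cols * 3)
    have hc : 0 ≤ cols := by nlinarith
    have hb : ∀ d ∈ PySem.List.pyRange 0 (min ((cells.length : Int) - cols * 2) (cols * 3)) 1,
        ¬ d + cols * 2 > (cells.length : Int) := by
      intro d hdm
      rw [PySem.List.mem_pyRange_one] at hdm
      omega
    rw [pv_nobreak cells cols _ _ hb,
      PySem.List.slice_to cells (by omega :
        (0:Int) ≤ min ((cells.length : Int) - cols * 2) (cols * 3) + 2 * cols)]
    have hm : ((min ((cells.length : Int) - cols * 2) (cols * 3) + 2 * cols).toNat : Int)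
        = min ((cells.length : Int) - cols * 2) (cols * 3) + 2 * cols := Int.toNat_of_nonneg (by omega)
    have hfold : (PySem.List.pyRange 0 (min ((cells.length : Int) - cols * 2) (cols * 3)) 1).foldl
        (fun (q : Int × Int) d =>
          let score : Int := (((PySem.List.slice cells (some d) (some (d + cols))).countP isNumPy : Nat) : Int)
            + (((PySem.List.slice cells (some (d + cols)) (some (d + cols * 2))).countP isNumPy : Nat) : Int)
          if score > q.2 then (d, score) else q) (0, -1)
      = (PySem.List.pyRange 0 (min ((cells.length : Int) - cols * 2) (cols * 3)) 1).foldl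
        (pvStepB (((cells.take ((min ((cells.length : Int) - cols * 2) (cols * 3) + 2 * cols).toNat)).foldl
          (fun (p : Int × List Int) c =>
            (p.1 + (if isNumPy c then (1 : Int) else 0),
             p.2 ++ [p.1 + (if isNumPy c then (1 : Int) else 0)])) (0, [(0 : Int)])).2) (2 * cols)) (0, -1) := by
      apply PySem.List.foldl_congr_mem
      intro acc d hdm
      rw [PySem.List.mem_pyRange_one] at hdm
      have hsc := pv_score_eq cells cols d
        ((min ((cells.length : Int) - cols * 2) (cols * 3) + 2 * cols).toNat)
        hc hdm.1 (by omega) (by omega)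
      simp only [pvStepB, hsc]
    rw [hfold]
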